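-- pv_equiv track=rewrite | github.com/BrendelGroup/HymHub | lib/hilocus_utils.py | iloci_by_species
-- ===== SOURCE A (Python) =====
-- def iloci_by_species(iloci):
--     """
--     Index iLocus IDs by species.
--
--     Given a list of iLocus IDs associated with a hiLocus, create a dictionary
--     of lists: keys are species labels, and values are lists of iLocus IDs
--     (strings).
--     """
--     idx = dict()
--     for locus in iloci:
--         species = locus[6:10]
--         if species not in idx:
--             idx[species] = list()
--         idx[species].append(locus)
--     return idx
-- ===== SOURCE B (Python) =====
-- def iloci_by_species(iloci):
--     """Two-pass grouping: collect the distinct species keys in first-occurrence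
--     order, then build each species' list by filtering the input once per key."""
--     species = list(dict.fromkeys(locus[6:10] for locus in iloci))
--     return {sp: [locus for locus in iloci if locus[6:10] == sp] for sp in species}
-- ===== Notes on version B (the rewrite author's own statement) =====
-- stated objective: alternative
-- what changed: A builds the dict in one pass, appending each locus to its species bucket; B first dedups the species keys (first-occurrence order) and then builds each bucket by filtering the whole list once per distinct key.
import Mathlib
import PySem

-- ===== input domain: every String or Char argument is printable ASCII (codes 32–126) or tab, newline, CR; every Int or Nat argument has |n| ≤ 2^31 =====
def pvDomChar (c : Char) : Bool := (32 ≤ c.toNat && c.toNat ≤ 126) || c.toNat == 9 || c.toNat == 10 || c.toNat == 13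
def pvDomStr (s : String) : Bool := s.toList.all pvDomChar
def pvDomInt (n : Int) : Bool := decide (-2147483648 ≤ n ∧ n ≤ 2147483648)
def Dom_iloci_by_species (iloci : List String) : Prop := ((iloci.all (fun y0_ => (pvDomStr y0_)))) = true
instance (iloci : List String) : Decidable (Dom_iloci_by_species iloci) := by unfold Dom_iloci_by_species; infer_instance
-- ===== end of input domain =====

-- B replaces A's single-pass dict-of-appends with a two-pass scheme (dedup the
-- species keys, then one filter pass per distinct key); objective: alternative decomposition.

-- locus[6:10]
def pvKey (locus : String) : String := PySem.Str.slice locus (some 6) (some 10)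

-- ===== PORT A =====
def iloci_by_species (iloci : List String) : List (String × List String) :=
  (iloci.foldl (fun idx locus =>
      let species := pvKey locus
      let idx' := if idx.contains species then idx else idx.insert species []
      idx'.modify species [] (fun v => v ++ [locus]))
    PySem.Dict.empty).items

-- ===== PORT B =====
def iloci_by_species_alt (iloci : List String) : List (String × List String) :=
  (PySem.List.dedup (iloci.map pvKey)).map
    (fun sp => (sp, iloci.filter (fun locus => pvKey locus == sp)))

-- ===== PRECONDITION & SPEC =====
def Spec_iloci_by_species (iloci : List String) (out : List (String × List String)) : Prop := out = iloci_by_species_alt iloci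
instance (iloci : List String) (out : List (String × List String)) : Decidable (Spec_iloci_by_species iloci out) := by unfold Spec_iloci_by_species; infer_instance

-- ===== CLAIM (what is proved, stated in full; the proofs are below) =====
def Claim_equal_iloci_by_species : Prop := ∀ (iloci : List String), Dom_iloci_by_species iloci → Spec_iloci_by_species iloci (iloci_by_species iloci)

-- ===== LEMMAS AND PROOFS =====

-- A's loop body equals a plain 'modify (append)' step: the insert of [] on a
-- fresh key is absorbed by the subsequent append to that key.
theorem pv_stepA_eq (d : PySem.Dict String (List String)) (l : String) :
    (let species := pvKey l
     let idx' := if d.contains species then d else d.insert species []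
     idx'.modify species [] (fun v => v ++ [l]))
    = d.modify (pvKey l) [] (fun v => v ++ [l]) := by
  by_cases h : d.contains (pvKey l)
  · simp [h]
  · simp only [Bool.not_eq_true] at h
    simp [h, PySem.Dict.modify, PySem.Dict.insert_insert_self, PySem.Dict.getD_insert_self,
          PySem.Dict.getD_of_not_contains]

-- The modify loop's items are exactly B's dedup-keys-then-filter result.
theorem pv_main (iloci : List String) :
    iloci_by_species iloci = iloci_by_species_alt iloci := by
  unfold iloci_by_species iloci_by_species_alt
  have hstep : (fun (idx : PySem.Dict String (List String)) locus =>
      let species := pvKey locus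
      let idx' := if idx.contains species then idx else idx.insert species []
      idx'.modify species [] (fun v => v ++ [locus]))
    = fun idx locus => idx.modify (pvKey locus) [] (fun v => v ++ [locus]) := by
    funext d l; exact pv_stepA_eq d l
  rw [hstep]
  set D := iloci.foldl (fun d l => d.modify (pvKey l) [] (fun v => v ++ [l])) PySem.Dict.empty with hD
  have hnd : D.keys.Nodup := by
    rw [hD]; exact PySem.Dict.nodup_keys_foldl_modify_key _ _ _ _ _ PySem.Dict.nodup_keys_empty
  have hkeys : D.keys = PySem.List.dedup (iloci.map pvKey) := by
    rw [hD, PySem.Dict.keys_foldl_modify_key]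
    simp [PySem.Dict.keys_empty, PySem.Set.update, PySem.Set.ofList_eq_foldl]
  have hget : ∀ c, D.getD c [] = iloci.filter (fun l => pvKey l == c) := by
    intro c
    have h2 : D = (iloci.map (fun x => (pvKey x, x))).foldl
        (fun d p => d.modify p.1 [] (fun v => v ++ [p.2])) PySem.Dict.empty := by
      rw [hD, List.foldl_map]
    rw [h2, PySem.Dict.getD_foldl_modify_append]
    simp [List.filter_map, Function.comp_def]
  rw [PySem.Dict.items_eq_map_keys D hnd [], hkeys]
  exact List.map_congr_left (fun k _ => by rw [hget k])

-- ===== VERDICT (by name: the statement is the Claim_ definition above) =====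
theorem iloci_by_species_spec : Claim_equal_iloci_by_species := by
  intro iloci _
  unfold Spec_iloci_by_species
  exact pv_main iloci
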